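-- pv_equiv track=rewrite | github.com/alirafiqmalik/ach-model-checking | tools/nuxmv_model_stats.py | _parse_fsm_headlines
-- ===== SOURCE A (Python) =====
-- def _parse_fsm_headlines(text: str) -> dict[str, str]:
--     """Take FSM summary lines; cluster sizes only from the forward schedule (nuXmv repeats backward)."""
--     found: dict[str, str] = {}
--     clusters: list[str] = []
--     forward = False
--     for line in text.splitlines():
--         s = line.strip()
--         if "Forward Partitioning Schedule" in line:
--             forward = True
--             continue
--         if "Backward Partitioning Schedule" in line:
--             break
--         if forward and s.startswith("cluster ") and ":	size" in s:
--             clusters.append(s.replace("\t", " "))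
--     for line in text.splitlines():
--         s = line.strip()
--         if s.startswith("BDD nodes representing"):
--             key = s.split(":")[0].strip()
--             found[key] = s.split(":", 1)[1].strip()
--     if clusters:
--         found["BDD cluster sizes (forward schedule)"] = "; ".join(clusters)
--     return found
-- ===== SOURCE B (Python) =====
-- def _parse_fsm_headlines(text: str) -> dict[str, str]:
--     """Single pass over the lines: flags replace the original's two scans + break."""
--     found: dict[str, str] = {}
--     clusters: list[str] = []
--     in_forward = False
--     past_backward = False
--     for line in text.splitlines():
--         s = line.strip()
--         if not past_backward:
--             if "Forward Partitioning Schedule" in line: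
--                 in_forward = True
--             elif "Backward Partitioning Schedule" in line:
--                 past_backward = True
--             elif in_forward and s.startswith("cluster ") and ":\tsize" in s:
--                 clusters.append(s.replace("\t", " "))
--         if s.startswith("BDD nodes representing"):
--             key, _, value = s.partition(":")
--             found[key.strip()] = value.strip()
--     if clusters:
--         found["BDD cluster sizes (forward schedule)"] = "; ".join(clusters)
--     return found
-- ===== Notes on version B (the rewrite author's own statement) =====
-- stated objective: alternative
-- what changed: B fuses A's two scans of text.splitlines() (a cluster loop with break, then a full BDD-line loop) into one pass that keeps in_forward/past_backward flags and harvests BDD lines unconditionally, extracting key/value with str.partition.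
import Mathlib
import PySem

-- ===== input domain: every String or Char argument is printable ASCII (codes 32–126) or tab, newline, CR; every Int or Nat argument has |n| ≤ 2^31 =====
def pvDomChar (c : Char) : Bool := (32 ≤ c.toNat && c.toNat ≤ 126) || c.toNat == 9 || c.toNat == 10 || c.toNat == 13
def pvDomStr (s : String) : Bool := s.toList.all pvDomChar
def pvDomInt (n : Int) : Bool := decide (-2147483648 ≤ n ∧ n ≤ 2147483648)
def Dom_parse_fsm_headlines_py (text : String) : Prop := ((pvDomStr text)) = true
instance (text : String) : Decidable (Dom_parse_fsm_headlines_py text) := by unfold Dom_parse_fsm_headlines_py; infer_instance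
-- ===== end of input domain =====

-- B fuses A's two scans of the lines into a single pass with two flags (return value only).

-- ===== PORT A =====
-- first loop of A: collects forward-schedule cluster lines, `break` at the backward marker
def pvClustersA : List String → Bool → List String → List String
  | [], _, cl => cl
  | line :: rest, fwd, cl =>
    if PySem.Str.isIn "Forward Partitioning Schedule" line then pvClustersA rest true cl
    else if PySem.Str.isIn "Backward Partitioning Schedule" line then cl
    else
      let s := PySem.Str.strip line
      if fwd && PySem.Str.startswith s "cluster " && PySem.Str.isIn ":\tsize" s then
        pvClustersA rest fwd (cl ++ [PySem.Str.replace s "\t" " "])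
      else pvClustersA rest fwd cl

-- body of A's second loop; s.split(":")[0] via split?, s.split(":", 1)[1] via splitMax?
-- with [1] read by getD — exact whenever s contains ":" (guaranteed by Pre_; Python raises IndexError otherwise)
def pvBddStepA (d : PySem.Dict String String) (line : String) : PySem.Dict String String :=
  let s := PySem.Str.strip line
  if PySem.Str.startswith s "BDD nodes representing" then
    PySem.Dict.insert d (PySem.Str.strip (((PySem.Str.split? s ":").getD []).headD ""))
      (PySem.Str.strip (((PySem.Str.splitMax? s ":" 1).getD []).getD 1 ""))
  else d

def parse_fsm_headlines_py (text : String) : List (String × String) :=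
  let lines := PySem.Str.splitlines text
  let clusters := pvClustersA lines false []
  let found := lines.foldl pvBddStepA PySem.Dict.empty
  let found :=
    if clusters ≠ [] then
      PySem.Dict.insert found "BDD cluster sizes (forward schedule)" (PySem.Str.join "; " clusters)
    else found
  found.items

-- ===== PORT B =====
-- body of B's single loop; state = (found, clusters, in_forward, past_backward).
-- s.partition(":") is ported exactly: its first component is s.split(":")[0] and its third
-- is s.split(":", 1)[1] when ":" occurs in s and "" otherwise (= getD 1 "" on the maxsplit-1 split).
def pvStepB (st : PySem.Dict String String × List String × Bool × Bool) (line : String) :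
    PySem.Dict String String × List String × Bool × Bool :=
  match st with
  | (found, clusters, inF, pastB) =>
    let s := PySem.Str.strip line
    let t : List String × Bool × Bool :=
      if pastB then (clusters, inF, pastB)
      else if PySem.Str.isIn "Forward Partitioning Schedule" line then (clusters, true, pastB)
      else if PySem.Str.isIn "Backward Partitioning Schedule" line then (clusters, inF, true)
      else if inF && PySem.Str.startswith s "cluster " && PySem.Str.isIn ":\tsize" s then
        (clusters ++ [PySem.Str.replace s "\t" " "], inF, pastB)
      else (clusters, inF, pastB)
    let found' :=
      if PySem.Str.startswith s "BDD nodes representing" then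
        PySem.Dict.insert found (PySem.Str.strip (((PySem.Str.split? s ":").getD []).headD ""))
          (PySem.Str.strip (((PySem.Str.splitMax? s ":" 1).getD []).getD 1 ""))
      else found
    (found', t)

def parse_fsm_headlines_py_alt (text : String) : List (String × String) :=
  let st := (PySem.Str.splitlines text).foldl pvStepB (PySem.Dict.empty, [], false, false)
  (if st.2.1 ≠ [] then
      PySem.Dict.insert st.1 "BDD cluster sizes (forward schedule)" (PySem.Str.join "; " st.2.1)
    else st.1).items

-- ===== PRECONDITION & SPEC =====
-- Pre_ excludes exactly the inputs on which A raises (IndexError on s.split(":", 1)[1]): a line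
-- whose stripped form starts with "BDD nodes representing" but contains no ":" (B's partition
-- returns the key with an empty value there).
def Pre_parse_fsm_headlines_py (text : String) : Prop :=
  ∀ l ∈ PySem.Str.splitlines text,
    PySem.Str.startswith (PySem.Str.strip l) "BDD nodes representing" = true →
    PySem.Str.isIn ":" (PySem.Str.strip l) = true
instance (text : String) : Decidable (Pre_parse_fsm_headlines_py text) := by
  unfold Pre_parse_fsm_headlines_py; infer_instance
def pvWitness_parse_fsm_headlines_py : String :=
  "Forward Partitioning Schedule:\ncluster 1:\tsize 5\nBackward Partitioning Schedule:\nBDD nodes representing x: 10"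

def Spec_parse_fsm_headlines_py (text : String) (out : List (String × String)) : Prop :=
  out = parse_fsm_headlines_py_alt text
instance (text : String) (out : List (String × String)) : Decidable (Spec_parse_fsm_headlines_py text out) := by
  unfold Spec_parse_fsm_headlines_py; infer_instance

-- ===== CLAIM (what is proved, stated in full; the proofs are below) =====
def Claim_equal_parse_fsm_headlines_py : Prop :=
  ∀ (text : String), Dom_parse_fsm_headlines_py text → Pre_parse_fsm_headlines_py text →
    Spec_parse_fsm_headlines_py text (parse_fsm_headlines_py text)

-- ===== LEMMAS AND PROOFS =====
-- once past_backward is set, B's loop only keeps folding the BDD harvesting over found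
theorem pvStepB_past (lines : List String) (d : PySem.Dict String String)
    (cl : List String) (fwd : Bool) :
    lines.foldl pvStepB (d, cl, fwd, true) = (lines.foldl pvBddStepA d, cl, fwd, true) := by
  induction lines generalizing d with
  | nil => rfl
  | cons l rest ih =>
    simp [List.foldl, pvStepB, pvBddStepA]
    exact ih _

-- invariant of the fused loop while past_backward is false: found tracks A's second
-- loop, clusters tracks A's first loop
theorem pvStepB_eq (lines : List String) (d : PySem.Dict String String)
    (cl : List String) (fwd : Bool) :
    lines.foldl pvStepB (d, cl, fwd, false)
      = (lines.foldl pvBddStepA d, pvClustersA lines fwd cl,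
         (lines.foldl pvStepB (d, cl, fwd, false)).2.2) := by
  induction lines generalizing d cl fwd with
  | nil => rfl
  | cons l rest ih =>
    simp [List.foldl, pvStepB, pvClustersA, pvBddStepA]
    split_ifs <;> first
      | exact ih _ _ _
      | simp [pvStepB_past]

-- ===== VERDICT (by name: the statement is the Claim_ definition above) =====
theorem parse_fsm_headlines_py_spec : Claim_equal_parse_fsm_headlines_py := by
  intro text _ _
  unfold Spec_parse_fsm_headlines_py parse_fsm_headlines_py parse_fsm_headlines_py_alt
  rw [pvStepB_eq]
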